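-- pv_equiv track=rewrite | github.com/mnozkiewicz/Algorithms-for-computationally-hard-problems | lab3/x3c.py | reduce_to_sat
-- ===== SOURCE A (Python) =====
-- from collections import defaultdict
-- from itertools import combinations
--
-- def reduce_to_sat(size: int, sets: list[list[int]]):
--     elem_sets: dict[int, list[int]] = defaultdict(lambda: [])
--     for i, set3 in enumerate(sets):
--         for elem in set3:
--             elem_sets[elem].append(i + 1)
--
--     cnf = list(elem_sets.values())
--     for a, b in combinations(range(len(sets)), 2):
--         if set(sets[a]).intersection(set(sets[b])):
--             cnf.append([-(a + 1), -(b + 1)])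
--
--     return cnf
-- ===== SOURCE B (Python) =====
-- def reduce_to_sat(size: int, sets: list[list[int]]):
--     elem_sets = {}
--     for i, set3 in enumerate(sets):
--         for elem in set3:
--             elem_sets.setdefault(elem, []).append(i + 1)
--
--     cnf = list(elem_sets.values())
--
--     # conflict pairs only from sets co-occurring on some element
--     succ = {}  # 1-based set index -> {larger conflicting 1-based indices}
--     for occ in elem_sets.values():
--         u = sorted(set(occ))
--         for j, x in enumerate(u):
--             for y in u[j + 1:]:
--                 succ.setdefault(x, set()).add(y)
--
--     for a in sorted(succ):
--         for b in sorted(succ[a]):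
--             cnf.append([-a, -b])
--
--     return cnf
-- ===== Notes on version B (the rewrite author's own statement) =====
-- stated objective: faster
-- what changed: Instead of testing all O(m^2) index pairs with per-pair set intersections, B generates conflict pairs only from indices co-occurring in some element's occurrence list, dedups them in per-index successor sets, and emits them in sorted order.
import Mathlib
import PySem

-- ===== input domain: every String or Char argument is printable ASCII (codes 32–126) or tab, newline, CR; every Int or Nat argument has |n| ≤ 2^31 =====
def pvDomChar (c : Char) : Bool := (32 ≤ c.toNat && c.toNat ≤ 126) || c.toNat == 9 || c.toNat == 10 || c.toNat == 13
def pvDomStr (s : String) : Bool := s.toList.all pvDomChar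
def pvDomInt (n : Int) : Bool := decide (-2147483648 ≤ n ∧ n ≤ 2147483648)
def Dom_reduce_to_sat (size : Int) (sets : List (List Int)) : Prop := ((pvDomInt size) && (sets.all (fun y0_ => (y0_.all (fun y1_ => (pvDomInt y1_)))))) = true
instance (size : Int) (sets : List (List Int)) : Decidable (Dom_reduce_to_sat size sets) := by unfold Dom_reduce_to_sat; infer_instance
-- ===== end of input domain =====

-- B replaces A's scan over all O(m^2) index pairs (with a set intersection per pair) by
-- generating conflict pairs only from indices that co-occur in some element's occurrence
-- list, deduplicated in per-index successor sets and emitted in sorted order (faster).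

-- ===== PORT A =====
def reduce_to_sat (size : Int) (sets : List (List Int)) : List (List Int) :=
  let elem_sets : PySem.Dict Int (List Int) :=
    (PySem.List.enumerate sets 0).foldl
      (fun d p => p.2.foldl (fun d e => d.modify e [] (fun l => l ++ [p.1 + 1])) d)
      PySem.Dict.empty
  let cnf := elem_sets.values
  (PySem.List.combinations (PySem.List.pyRange 0 (PySem.List.len sets) 1) 2).foldl
    (fun cnf c =>
      match c with
      | [a, b] =>
        if PySem.Set.inter (PySem.Set.ofList (PySem.List.pyGetD sets a []))
            (PySem.Set.ofList (PySem.List.pyGetD sets b [])) ≠ [] then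
          cnf ++ [[-(a + 1), -(b + 1)]]
        else cnf
      | _ => cnf)
    cnf

-- ===== PORT B =====
def reduce_to_sat_alt (size : Int) (sets : List (List Int)) : List (List Int) :=
  let elem_sets : PySem.Dict Int (List Int) :=
    (PySem.List.enumerate sets 0).foldl
      (fun d p => p.2.foldl (fun d e => d.modify e [] (fun l => l ++ [p.1 + 1])) d)
      PySem.Dict.empty
  let cnf := elem_sets.values
  let succ : PySem.Dict Int (PySem.Set Int) :=
    elem_sets.values.foldl
      (fun d occ =>
        let u := PySem.List.sorted (PySem.Set.ofList occ) (fun x => x)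
        (PySem.List.enumerate u 0).foldl
          (fun d p =>
            (PySem.List.slice u (some (p.1 + 1)) none).foldl
              (fun d y => d.modify p.2 PySem.Set.empty (fun s => PySem.Set.add s y)) d)
          d)
      PySem.Dict.empty
  (PySem.List.sorted succ.keys (fun x => x)).foldl
    (fun cnf a =>
      (PySem.List.sorted (succ.getD a PySem.Set.empty) (fun x => x)).foldl
        (fun cnf b => cnf ++ [[-a, -b]]) cnf)
    cnf

-- ===== PRECONDITION & SPEC =====
def Spec_reduce_to_sat (size : Int) (sets : List (List Int)) (out : List (List Int)) : Prop := out = reduce_to_sat_alt size sets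
instance (size : Int) (sets : List (List Int)) (out : List (List Int)) : Decidable (Spec_reduce_to_sat size sets out) := by unfold Spec_reduce_to_sat; infer_instance

-- ===== CLAIM (what is proved, stated in full; the proofs are below) =====
def Claim_equal_reduce_to_sat : Prop := ∀ (size : Int) (sets : List (List Int)), Dom_reduce_to_sat size sets → Spec_reduce_to_sat size sets (reduce_to_sat size sets)

-- ===== LEMMAS AND PROOFS =====

-- the (element, 1-based set index) pairs A's and B's dict-building loops traverse, flattened
def pvPairs (sets : List (List Int)) : List (Int × Int) :=
  (PySem.List.enumerate sets 0).flatMap (fun p => p.2.map (fun e => (e, p.1 + 1)))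

-- the element-occurrence dict both programs build
def pvES (sets : List (List Int)) : PySem.Dict Int (List Int) :=
  (pvPairs sets).foldl (fun d q => d.modify q.1 [] (fun l => l ++ [q.2])) PySem.Dict.empty

-- "1-based index j occurs for element e": e ∈ sets[j-1]
def pvOcc (sets : List (List Int)) (j e : Int) : Prop :=
  ∃ (i : Nat) (_ : i < sets.length), j = (i : Int) + 1 ∧ e ∈ sets[i]

-- the flattened pair stream B's successor-dict loop traverses
def pvPP (u : List Int) : List (Int × Int) :=
  (PySem.List.enumerate u 0).flatMap
    (fun p => (PySem.List.slice u (some (p.1 + 1)) none).map (fun y => (p.2, y)))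

def pvL2 (sets : List (List Int)) : List (Int × Int) :=
  (pvES sets).values.flatMap (fun occ => pvPP (PySem.List.sorted (PySem.Set.ofList occ) (fun x => x)))

-- B's successor dict
def pvSUCC (sets : List (List Int)) : PySem.Dict Int (PySem.Set Int) :=
  (pvL2 sets).foldl (fun d q => d.modify q.1 PySem.Set.empty (fun s => PySem.Set.add s q.2)) PySem.Dict.empty

-- the conflict test both tails filter by, as a Bool on 1-based indices
def pvCB (sets : List (List Int)) (a b : Int) : Bool :=
  decide (b ∈ (pvSUCC sets).getD a PySem.Set.empty)

-- the canonical tail both programs append after the occurrence lists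
def pvC (sets : List (List Int)) : List (List Int) :=
  (PySem.List.pyRange 1 ((sets.length : Int) + 1) 1).flatMap
    (fun a => ((PySem.List.pyRange (a + 1) ((sets.length : Int) + 1) 1).filter
                  (fun b => pvCB sets a b)).map (fun b => [-a, -b]))

-- lexicographic pair list underlying combinations(_, 2)
def pvPairsLex {α : Type} : List α → List (α × α)
  | [] => []
  | x :: t => t.map (fun y => (x, y)) ++ pvPairsLex t

lemma pvCombos2 {α : Type} (xs : List α) :
    PySem.List.combinations xs 2 = (pvPairsLex xs).map (fun p => [p.1, p.2]) := by
  induction xs with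
  | nil => rfl
  | cons x t ih =>
      rw [show (2 : Nat) = 1 + 1 from rfl, PySem.List.combinations_cons_succ,
        PySem.List.combinations_one]
      simp [pvPairsLex, ih, List.map_map, Function.comp]

lemma pvPairsLex_pyRange_aux (b : Int) : ∀ (n : Nat) (a : Int), (b - a).toNat = n →
    pvPairsLex (PySem.List.pyRange a b 1)
      = (PySem.List.pyRange a b 1).flatMap
          (fun x => (PySem.List.pyRange (x + 1) b 1).map (fun y => (x, y))) := by
  intro n
  induction n with
  | zero =>
      intro a ha
      rw [PySem.List.pyRange_one_eq_nil (by omega)]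
      rfl
  | succ n ih =>
      intro a ha
      rw [PySem.List.pyRange_one_cons (by omega)]
      simp only [pvPairsLex, List.flatMap_cons]
      rw [ih (a + 1) (by omega)]

lemma pvPairsLex_pyRange (a b : Int) :
    pvPairsLex (PySem.List.pyRange a b 1)
      = (PySem.List.pyRange a b 1).flatMap
          (fun x => (PySem.List.pyRange (x + 1) b 1).map (fun y => (x, y))) :=
  pvPairsLex_pyRange_aux b _ a rfl

lemma pvES_port (sets : List (List Int)) :
    (PySem.List.enumerate sets 0).foldl
      (fun d p => p.2.foldl (fun d e => d.modify e [] (fun l => l ++ [p.1 + 1])) d)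
      PySem.Dict.empty = pvES sets := by
  unfold pvES pvPairs
  rw [List.foldl_flatMap]
  simp only [List.foldl_map]

lemma pvSUCC_port (sets : List (List Int)) :
    (pvES sets).values.foldl
      (fun d occ =>
        let u := PySem.List.sorted (PySem.Set.ofList occ) (fun x => x)
        (PySem.List.enumerate u 0).foldl
          (fun d p =>
            (PySem.List.slice u (some (p.1 + 1)) none).foldl
              (fun d y => d.modify p.2 PySem.Set.empty (fun s => PySem.Set.add s y)) d)
          d)
      PySem.Dict.empty = pvSUCC sets := by
  unfold pvSUCC pvL2
  rw [List.foldl_flatMap]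
  congr 1
  funext d occ
  rw [pvPP, List.foldl_flatMap]
  simp only [List.foldl_map]

lemma pvMem_pvPairs (sets : List (List Int)) (e j : Int) :
    (e, j) ∈ pvPairs sets ↔ pvOcc sets j e := by
  unfold pvPairs pvOcc
  simp only [List.mem_flatMap, PySem.List.mem_enumerate_iff]
  constructor
  · rintro ⟨p, ⟨k, hk, rfl⟩, hmem⟩
    simp only [List.mem_map, Prod.mk.injEq] at hmem
    obtain ⟨x, hx, rfl, rfl⟩ := hmem
    exact ⟨k, hk, by omega, hx⟩
  · rintro ⟨i, hi, rfl, he⟩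
    refine ⟨((i : Int), sets[i]), ⟨i, hi, by simp⟩, ?_⟩
    simp only [List.mem_map, Prod.mk.injEq]
    exact ⟨e, he, rfl, trivial⟩

lemma pvES_getD (sets : List (List Int)) (e : Int) :
    (pvES sets).getD e [] = ((pvPairs sets).filter (fun q => q.1 == e)).map (fun q => q.2) := by
  unfold pvES
  rw [PySem.Dict.getD_foldl_modify_append]
  rfl

lemma pvMem_ES_getD (sets : List (List Int)) (e j : Int) :
    j ∈ (pvES sets).getD e [] ↔ pvOcc sets j e := by
  rw [pvES_getD]
  simp only [List.mem_map, List.mem_filter, beq_iff_eq]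
  constructor
  · rintro ⟨⟨e', j'⟩, ⟨hmem, rfl⟩, rfl⟩
    exact (pvMem_pvPairs sets _ _).1 hmem
  · intro h
    exact ⟨(e, j), ⟨(pvMem_pvPairs sets e j).2 h, rfl⟩, rfl⟩

lemma pvES_keys_nodup (sets : List (List Int)) : (pvES sets).keys.Nodup := by
  unfold pvES
  exact PySem.Dict.nodup_keys_foldl_modify_key _ _ _ _ _ PySem.Dict.nodup_keys_empty

lemma pvMem_ES_keys (sets : List (List Int)) (e : Int) :
    e ∈ (pvES sets).keys ↔ ∃ j, pvOcc sets j e := by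
  unfold pvES
  rw [PySem.Dict.keys_foldl_modify_key (pvPairs sets) (fun q => q.1) [] (fun _ q l => l ++ [q.2])]
  rw [PySem.Dict.keys_empty, PySem.Set.update_nil_left, PySem.Set.mem_ofList]
  simp only [List.mem_map]
  constructor
  · rintro ⟨⟨e', j⟩, hmem, rfl⟩
    exact ⟨j, (pvMem_pvPairs sets _ _).1 hmem⟩
  · rintro ⟨j, hj⟩
    exact ⟨(e, j), (pvMem_pvPairs sets e j).2 hj, rfl⟩

-- membership in B's pair stream over a strictly increasing list
lemma pvMem_pvPP (u : List Int) (hu : u.Pairwise (· < ·)) (a b : Int) :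
    (a, b) ∈ pvPP u ↔ a ∈ u ∧ b ∈ u ∧ a < b := by
  unfold pvPP
  simp only [List.mem_flatMap, PySem.List.mem_enumerate_iff]
  constructor
  · rintro ⟨p, ⟨k, hk, rfl⟩, hmem⟩
    rw [PySem.List.slice_from _ (by omega)] at hmem
    simp only [List.mem_map, Prod.mk.injEq] at hmem
    obtain ⟨y, hy, rfl, rfl⟩ := hmem
    have hidx : (0 + (k : Int) + 1).toNat = k + 1 := by omega
    rw [hidx] at hy
    obtain ⟨m, hm, rfl⟩ := List.mem_iff_getElem.mp hy
    rw [List.getElem_drop] at *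
    refine ⟨List.getElem_mem _, List.getElem_mem _, ?_⟩
    exact List.pairwise_iff_getElem.mp hu k (k + 1 + m) hk (by simp at hm ⊢; omega) (by omega)
  · rintro ⟨ha, hb, hab⟩
    obtain ⟨j, hj, rfl⟩ := List.mem_iff_getElem.mp ha
    obtain ⟨m, hm, rfl⟩ := List.mem_iff_getElem.mp hb
    have hjm : j < m := by
      rcases Nat.lt_trichotomy j m with h | h | h
      · exact h
      · subst h; omega
      · exact absurd (List.pairwise_iff_getElem.mp hu m j hm hj h) (by omega)
    refine ⟨((j : Int), u[j]), ⟨j, hj, by simp⟩, ?_⟩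
    rw [PySem.List.slice_from _ (by omega)]
    simp only []
    have hidx : (((j : Int), u[j]).1 + 1).toNat = j + 1 := by omega
    rw [hidx]
    simp only [List.mem_map, Prod.mk.injEq]
    refine ⟨u[m], ?_, trivial, rfl⟩
    refine List.mem_iff_getElem.mpr ⟨m - (j + 1), by simp; omega, ?_⟩
    rw [List.getElem_drop]
    congr 1
    omega

lemma pvMem_L2 (sets : List (List Int)) (a b : Int) :
    (a, b) ∈ pvL2 sets ↔ a < b ∧ ∃ e, pvOcc sets a e ∧ pvOcc sets b e := by
  unfold pvL2
  simp only [List.mem_flatMap]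
  rw [PySem.Dict.values_eq_map_keys _ (pvES_keys_nodup sets) []]
  constructor
  · rintro ⟨occ, hocc, hpp⟩
    rw [pvMem_pvPP _ (PySem.List.sorted_ofList_pairwise_lt occ) a b] at hpp
    simp only [PySem.List.mem_sorted, PySem.Set.mem_ofList] at hpp
    obtain ⟨ha, hb, hab⟩ := hpp
    simp only [List.mem_map] at hocc
    obtain ⟨e, _, rfl⟩ := hocc
    exact ⟨hab, e, (pvMem_ES_getD sets e a).1 ha, (pvMem_ES_getD sets e b).1 hb⟩
  · rintro ⟨hab, e, hae, hbe⟩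
    refine ⟨(pvES sets).getD e [], ?_, ?_⟩
    · simp only [List.mem_map]
      exact ⟨e, (pvMem_ES_keys sets e).2 ⟨a, hae⟩, rfl⟩
    · rw [pvMem_pvPP _ (PySem.List.sorted_ofList_pairwise_lt _) a b]
      simp only [PySem.List.mem_sorted, PySem.Set.mem_ofList]
      exact ⟨(pvMem_ES_getD sets e a).2 hae, (pvMem_ES_getD sets e b).2 hbe, hab⟩

lemma pvGetD_foldAdd (l : List (Int × Int)) (d : PySem.Dict Int (PySem.Set Int)) (a b : Int) :
    b ∈ (l.foldl (fun d q => d.modify q.1 PySem.Set.empty (fun s => PySem.Set.add s q.2)) d).getD a PySem.Set.empty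
      ↔ b ∈ d.getD a PySem.Set.empty ∨ (a, b) ∈ l := by
  induction l generalizing d with
  | nil => simp
  | cons q t ih =>
      obtain ⟨q1, q2⟩ := q
      rw [List.foldl_cons, ih]
      by_cases h : a = q1
      · subst h
        rw [PySem.Dict.getD_modify_self, PySem.Set.mem_add]
        simp only [List.mem_cons, Prod.mk.injEq, true_and]
        tauto
      · rw [PySem.Dict.getD_modify_of_ne _ _ _ h]
        simp only [List.mem_cons, Prod.mk.injEq, h, false_and]
        tauto

lemma pvGetD_empty {κ ν : Type} [BEq κ] (k : κ) (d0 : ν) :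
    (PySem.Dict.empty).getD k d0 = d0 := by
  simp [PySem.Dict.getD, PySem.Dict.get?, PySem.Dict.empty]

lemma pvMem_SUCC_getD (sets : List (List Int)) (a b : Int) :
    b ∈ (pvSUCC sets).getD a PySem.Set.empty ↔ (a, b) ∈ pvL2 sets := by
  unfold pvSUCC
  rw [pvGetD_foldAdd, pvGetD_empty]
  simp [PySem.Set.empty]

lemma pvMem_SUCC_keys (sets : List (List Int)) (a : Int) :
    a ∈ (pvSUCC sets).keys ↔ ∃ b, (a, b) ∈ pvL2 sets := by
  unfold pvSUCC
  rw [PySem.Dict.keys_foldl_modify_key (pvL2 sets) (fun q => q.1) PySem.Set.empty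
    (fun _ q s => PySem.Set.add s q.2)]
  rw [PySem.Dict.keys_empty, PySem.Set.update_nil_left, PySem.Set.mem_ofList]
  simp only [List.mem_map]
  constructor
  · rintro ⟨⟨a', b⟩, hmem, rfl⟩
    exact ⟨b, hmem⟩
  · rintro ⟨b, hb⟩
    exact ⟨(a, b), hb, rfl⟩

lemma pvSUCC_keys_nodup (sets : List (List Int)) : (pvSUCC sets).keys.Nodup := by
  unfold pvSUCC
  exact PySem.Dict.nodup_keys_foldl_modify_key _ _ _ _ _ PySem.Dict.nodup_keys_empty

lemma pvNodup_foldAdd (l : List (Int × Int)) (d : PySem.Dict Int (PySem.Set Int)) (a : Int)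
    (hd : (d.getD a PySem.Set.empty).Nodup) :
    ((l.foldl (fun d q => d.modify q.1 PySem.Set.empty (fun s => PySem.Set.add s q.2)) d).getD a PySem.Set.empty).Nodup := by
  induction l generalizing d with
  | nil => exact hd
  | cons q t ih =>
      rw [List.foldl_cons]
      apply ih
      by_cases h : a = q.1
      · subst h
        rw [PySem.Dict.getD_modify_self]
        exact PySem.Set.nodup_add _ _ hd
      · rw [PySem.Dict.getD_modify_of_ne _ _ _ h]
        exact hd

lemma pvSUCC_getD_nodup (sets : List (List Int)) (a : Int) :
    ((pvSUCC sets).getD a PySem.Set.empty).Nodup := by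
  unfold pvSUCC
  apply pvNodup_foldAdd
  rw [pvGetD_empty]
  simp [PySem.Set.empty]

-- bounds: every index occurring in pvL2 is a 1-based index of sets
lemma pvL2_bounds (sets : List (List Int)) (a b : Int) (h : (a, b) ∈ pvL2 sets) :
    1 ≤ a ∧ a < b ∧ b < (sets.length : Int) + 1 := by
  rw [pvMem_L2] at h
  obtain ⟨hab, e, ⟨i, hi, rfl, _⟩, ⟨k, hk, rfl, _⟩⟩ := h
  omega

-- B's two sorted() calls, characterised as filters of ranges
lemma pvSorted_keys (sets : List (List Int)) :
    PySem.List.sorted (pvSUCC sets).keys (fun x => x)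
      = (PySem.List.pyRange 1 ((sets.length : Int) + 1) 1).filter
          (fun a => decide (a ∈ (pvSUCC sets).keys)) := by
  apply PySem.List.sorted_eq_of_perm_of_pairwise_lt
  · rw [List.perm_ext_iff_of_nodup (List.Nodup.filter _ (PySem.List.nodup_pyRange_one _ _))
      (pvSUCC_keys_nodup sets)]
    intro a
    simp only [List.mem_filter, PySem.List.mem_pyRange_one, decide_eq_true_eq]
    constructor
    · exact fun h => h.2
    · intro h
      refine ⟨?_, h⟩
      obtain ⟨b, hb⟩ := (pvMem_SUCC_keys sets a).1 h
      have := pvL2_bounds sets a b hb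
      omega
  · exact List.Pairwise.filter _ (PySem.List.pairwise_lt_pyRange_one _ _)

lemma pvSorted_getD (sets : List (List Int)) (a : Int) :
    PySem.List.sorted ((pvSUCC sets).getD a PySem.Set.empty) (fun x => x)
      = (PySem.List.pyRange (a + 1) ((sets.length : Int) + 1) 1).filter (fun b => pvCB sets a b) := by
  apply PySem.List.sorted_eq_of_perm_of_pairwise_lt
  · rw [List.perm_ext_iff_of_nodup (List.Nodup.filter _ (PySem.List.nodup_pyRange_one _ _))
      (pvSUCC_getD_nodup sets a)]
    intro b
    simp only [List.mem_filter, PySem.List.mem_pyRange_one, pvCB, decide_eq_true_eq]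
    constructor
    · exact fun h => h.2
    · intro h
      refine ⟨?_, h⟩
      have := pvL2_bounds sets a b ((pvMem_SUCC_getD sets a b).1 h)
      omega
  · exact List.Pairwise.filter _ (PySem.List.pairwise_lt_pyRange_one _ _)

-- dropping range entries whose contribution is empty
lemma pvFlatMap_filter {α β : Type} (l : List α) (p : α → Bool) (f : α → List β)
    (h : ∀ x ∈ l, p x = false → f x = []) : (l.filter p).flatMap f = l.flatMap f := by
  induction l with
  | nil => rfl
  | cons x t ih =>
      by_cases hx : p x
      · rw [List.filter_cons_of_pos hx, List.flatMap_cons, List.flatMap_cons,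
          ih (fun y hy => h y (List.mem_cons_of_mem _ hy))]
      · rw [List.filter_cons_of_neg (by simpa using hx), List.flatMap_cons,
          h x List.mem_cons_self (by simpa using hx),
          ih (fun y hy => h y (List.mem_cons_of_mem _ hy))]
        rfl

-- filter over flatMap
lemma pvFilter_flatMap {α β : Type} (l : List α) (f : α → List β) (p : β → Bool) :
    (l.flatMap f).filter p = l.flatMap (fun x => (f x).filter p) := by
  induction l with
  | nil => rfl
  | cons x t ih => rw [List.flatMap_cons, List.flatMap_cons, List.filter_append, ih]

-- shifting a range by one
lemma pvRange_shift (a b : Int) :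
    PySem.List.pyRange (a + 1) (b + 1) 1 = (PySem.List.pyRange a b 1).map (fun x => x + 1) := by
  rw [PySem.List.pyRange_one, PySem.List.pyRange_one, List.map_map]
  have : (b + 1 - (a + 1)).toNat = (b - a).toNat := by omega
  rw [this]
  congr 1
  funext k
  simp [Function.comp]
  ring

-- the conflict tests agree on in-range pairs
lemma pvTest_iff (sets : List (List Int)) (a0 b0 : Int)
    (ha : 0 ≤ a0) (hab : a0 < b0) (hb : b0 < (sets.length : Int)) :
    decide (PySem.Set.inter (PySem.Set.ofList (PySem.List.pyGetD sets a0 []))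
        (PySem.Set.ofList (PySem.List.pyGetD sets b0 [])) ≠ [])
      = pvCB sets (a0 + 1) (b0 + 1) := by
  rw [pvCB, decide_eq_decide]
  rw [pvMem_SUCC_getD, pvMem_L2]
  rw [PySem.List.pyGetD_eq_getElem sets [] ha (by omega),
    PySem.List.pyGetD_eq_getElem sets [] (by omega) (by omega)]
  constructor
  · intro hne
    obtain ⟨e, he⟩ := List.exists_mem_of_ne_nil _ hne
    rw [PySem.Set.mem_inter, PySem.Set.mem_ofList, PySem.Set.mem_ofList] at he
    refine ⟨by omega, e, ⟨a0.toNat, by omega, by omega, he.1⟩, ⟨b0.toNat, by omega, by omega, he.2⟩⟩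
  · rintro ⟨_, e, ⟨i, hi, hia, hei⟩, ⟨k, hk, hkb, hek⟩⟩
    have hia' : i = a0.toNat := by omega
    have hkb' : k = b0.toNat := by omega
    subst hia' hkb'
    intro hnil
    have : e ∈ PySem.Set.inter (PySem.Set.ofList sets[a0.toNat]) (PySem.Set.ofList sets[b0.toNat]) := by
      rw [PySem.Set.mem_inter, PySem.Set.mem_ofList, PySem.Set.mem_ofList]
      exact ⟨hei, hek⟩
    rw [hnil] at this
    exact absurd this (List.not_mem_nil)

-- A's tail equals the canonical tail
lemma pvA_tail (sets : List (List Int)) (cnf : List (List Int)) :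
    (PySem.List.combinations (PySem.List.pyRange 0 (PySem.List.len sets) 1) 2).foldl
      (fun cnf c =>
        match c with
        | [a, b] =>
          if PySem.Set.inter (PySem.Set.ofList (PySem.List.pyGetD sets a []))
              (PySem.Set.ofList (PySem.List.pyGetD sets b [])) ≠ [] then
            cnf ++ [[-(a + 1), -(b + 1)]]
          else cnf
        | _ => cnf)
      cnf = cnf ++ pvC sets := by
  rw [pvCombos2, List.foldl_map]
  show (pvPairsLex (PySem.List.pyRange 0 (PySem.List.len sets) 1)).foldl
      (fun cnf p =>
        if PySem.Set.inter (PySem.Set.ofList (PySem.List.pyGetD sets p.1 []))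
            (PySem.Set.ofList (PySem.List.pyGetD sets p.2 [])) ≠ [] then
          cnf ++ [[-(p.1 + 1), -(p.2 + 1)]]
        else cnf) cnf = cnf ++ pvC sets
  rw [PySem.List.foldl_append_ite
    (fun p : Int × Int => PySem.Set.inter (PySem.Set.ofList (PySem.List.pyGetD sets p.1 []))
      (PySem.Set.ofList (PySem.List.pyGetD sets p.2 [])) ≠ [])
    (fun p : Int × Int => [-(p.1 + 1), -(p.2 + 1)])]
  congr 1
  rw [PySem.List.len_eq, pvPairsLex_pyRange, pvFilter_flatMap, List.map_flatMap]
  unfold pvC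
  rw [show PySem.List.pyRange 1 ((sets.length : Int) + 1) 1
        = (PySem.List.pyRange 0 (sets.length : Int) 1).map (fun x => x + 1) from by
      simpa using pvRange_shift 0 (sets.length : Int)]
  rw [List.flatMap_map]
  refine List.flatMap_congr (fun x hx => ?_)
  have hxr : 0 ≤ x ∧ x < (sets.length : Int) := PySem.List.mem_pyRange_one.mp hx
  rw [List.filter_map, List.map_map]
  rw [show PySem.List.pyRange (x + 1 + 1) ((sets.length : Int) + 1) 1
        = (PySem.List.pyRange (x + 1) (sets.length : Int) 1).map (fun y => y + 1) from
      pvRange_shift (x + 1) (sets.length : Int)]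
  rw [List.filter_map, List.map_map]
  rw [List.filter_congr (q := fun y => pvCB sets (x + 1) (y + 1) )
    (fun y hy => ?_)]
  · rfl
  · have hyr : x + 1 ≤ y ∧ y < (sets.length : Int) := PySem.List.mem_pyRange_one.mp hy
    show decide _ = _
    exact pvTest_iff sets x y hxr.1 (by omega) hyr.2

-- B's tail equals the canonical tail
lemma pvB_tail (sets : List (List Int)) (cnf : List (List Int)) :
    (PySem.List.sorted (pvSUCC sets).keys (fun x => x)).foldl
      (fun cnf a =>
        (PySem.List.sorted ((pvSUCC sets).getD a PySem.Set.empty) (fun x => x)).foldl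
          (fun cnf b => cnf ++ [[-a, -b]]) cnf)
      cnf = cnf ++ pvC sets := by
  simp only [PySem.List.foldl_append_singleton_eq_map]
  rw [PySem.List.foldl_append_eq_flatMap]
  congr 1
  rw [pvSorted_keys]
  rw [pvFlatMap_filter]
  · unfold pvC
    refine List.flatMap_congr (fun a _ => ?_)
    rw [pvSorted_getD]
  · intro a _ hfa
    rw [pvSorted_getD, List.filter_eq_nil_iff.mpr, List.map_nil]
    intro b _
    simp only [pvCB, decide_eq_true_eq]
    intro hmem
    have := (pvMem_SUCC_keys sets a).2 ⟨b, (pvMem_SUCC_getD sets a b).1 hmem⟩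
    simp [this] at hfa

-- ===== VERDICT (by name: the statement is the Claim_ definition above) =====
theorem reduce_to_sat_spec : Claim_equal_reduce_to_sat := by
  intro size sets _
  unfold Spec_reduce_to_sat
  show reduce_to_sat size sets = reduce_to_sat_alt size sets
  unfold reduce_to_sat reduce_to_sat_alt
  simp only [pvES_port, pvSUCC_port, pvA_tail, pvB_tail]
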